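-- pv_equiv track=rewrite | github.com/manwar/perlweeklychallenge-club | challenge-169/roger-bell-west/python/ch-1.py | brilliant
-- ===== SOURCE A (Python) =====
-- from math import sqrt,floor,gcd
-- from collections import deque
--
-- def genprimes(mx):
--   primesh=set(range(2,4))
--   for i in range(6,mx+2,6):
--     for j in range(i-1,i+2,2):
--       if j <= mx:
--         primesh.add(j)
--   q=deque([2,3,5,7])
--   p=q.popleft()
--   mr=floor(sqrt(mx))
--   while p <= mr:
--     if p in primesh:
--       for i in range(p*p,mx+1,p):
--         primesh.discard(i)
--     if len(q) < 2:
--       q.append(q[-1]+4)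
--       q.append(q[-1]+2)
--     p=q.popleft()
--   primes=list(primesh)
--   primes.sort()
--   return primes
--
-- def brilliant(ct):
--   base = 1
--   out = set()
--   while True:
--     pl = [x for x in genprimes(base * 10) if x >= base]
--     for ai in range(len(pl)):
--       for bi in range(ai,len(pl)):
--         out.add(pl[ai] * pl[bi])
--     if len(out) >= ct:
--       break
--     base *= 10
--   o = list(out)
--   o.sort()
--   return o[0:ct]
-- ===== SOURCE B (Python) =====
-- def isprime(n):
--     if n < 2:
--         return False
--     d = 2
--     while d * d <= n:
--         if n % d == 0:
--             return False
--         d += 1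
--     return True
--
-- def brilliant(ct):
--     result = []
--     base = 1
--     while len(result) < ct:
--         pl = [n for n in range(base, base * 10) if isprime(n)]
--         prods = [pl[i] * q for i in range(len(pl)) for q in pl[i:]]
--         prods.sort()
--         result.extend(prods)
--         base *= 10
--     return result[:ct]
-- ===== Notes on version B (the rewrite author's own statement) =====
-- stated objective: simpler
-- what changed: Replaces the deque-driven 6k±1 sieve, the global product set and the final global sort by a plain trial-division primality test per digit band, a per-band sorted product list appended to a running result (products of two primes are distinct and band k's products all precede band k+1's, so no set and no global sort are needed).
-- intended difference: For -10 < ct < 0 A returns the first 10+ct band-one products (an artifact of the negative stop in o[0:ct]); B returns [], the intended result for a non-positive count (for ct <= -10 both return []). — e.g. on brilliant(-3): A returns [4, 6, 9, 10, 14, 15, 21], B returns []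
import Mathlib
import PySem

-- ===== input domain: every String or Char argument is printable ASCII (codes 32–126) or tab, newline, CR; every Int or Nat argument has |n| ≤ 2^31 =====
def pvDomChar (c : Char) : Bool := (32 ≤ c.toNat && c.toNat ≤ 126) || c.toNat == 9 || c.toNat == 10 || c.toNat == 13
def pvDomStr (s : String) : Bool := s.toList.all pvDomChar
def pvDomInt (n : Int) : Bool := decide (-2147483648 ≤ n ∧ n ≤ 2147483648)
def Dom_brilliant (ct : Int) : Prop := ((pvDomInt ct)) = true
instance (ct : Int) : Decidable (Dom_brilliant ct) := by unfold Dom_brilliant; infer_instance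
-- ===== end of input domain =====

-- B replaces A's deque-driven 6k±1 sieve / global product set / final global sort by per-band
-- trial-division primes and per-band sorted product lists appended in order (objective: simpler).

-- ===== PORT A =====
-- Python's sorted()/list.sort() on ints: mergeSort form (stack-safe under #eval); proved equal
-- to PySem.List.sorted in pvSortInt_eq below
def pvSortInt (xs : List Int) : List Int := xs.mergeSort (fun a b => decide (a ≤ b))

-- floor(sqrt(n)) as a kernel-transparent count (proved equal to Nat.sqrt below)
def pyISqrt (n : Nat) : Nat := (List.range (n+1)).countP (fun r => decide (r*r ≤ n)) - 1

-- the 'while p <= mr' sieve loop of genprimes; fuel only makes the recursion structural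
-- (the divisor p strictly increases each pass, so the fuel supplied below is never exhausted)
def pySieve (mx mr : Int) : Nat → PySem.Set Int → List Int → Int → PySem.Set Int
  | 0, s, _, _ => s
  | fuel+1, s, q, p =>
    if p ≤ mr then
      let s' := if PySem.Set.contains s p then
          (PySem.List.pyRange (p*p) (mx+1) p).foldl PySem.Set.discard s else s
      let q' := if q.length < 2 then
          let q1 := q ++ [q.getLastD 0 + 4]
          q1 ++ [q1.getLastD 0 + 2]
        else q
      pySieve mx mr fuel s' q'.tail q'.headI
    else s

def genprimesA (mx : Int) : List Int :=
  let primesh0 : PySem.Set Int := PySem.Set.ofList (PySem.List.pyRange 2 4 1)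
  let primesh := (PySem.List.pyRange 6 (mx+2) 6).foldl
     (fun s i => (PySem.List.pyRange (i-1) (i+2) 2).foldl
        (fun s j => if j ≤ mx then PySem.Set.add s j else s) s) primesh0
  -- floor(sqrt(mx)): ported as the exact integer square root (= the float computation on the sizes in play)
  let mr : Int := (pyISqrt mx.toNat : Int)
  let final := pySieve mx mr (mx.toNat + 4) primesh [3, 5, 7] 2
  pvSortInt final

-- the 'while True' band loop of brilliant; fuel ct.toNat+1 is never exhausted (each band
-- adds at least one product, so at most ct bands run before len(out) >= ct)
def bandA (ct : Int) : Nat → Int → PySem.Set Int → PySem.Set Int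
  | 0, _, out => out
  | fuel+1, base, out =>
    let pl := (genprimesA (base*10)).filter (fun x => decide (base ≤ x))
    let out' := (PySem.List.pyRange 0 (pl.length : Int) 1).foldl (fun o ai =>
        (PySem.List.pyRange ai (pl.length : Int) 1).foldl (fun o bi =>
           PySem.Set.add o (PySem.List.pyGetD pl ai 0 * PySem.List.pyGetD pl bi 0)) o) out
    if ct ≤ (out'.length : Int) then out'
    else bandA ct fuel (base*10) out'

def brilliant (ct : Int) : List Int :=
  let o := pvSortInt (bandA ct (ct.toNat + 1) 1 PySem.Set.empty)
  PySem.List.slice o (some 0) (some ct)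

-- ===== PORT B =====
-- the 'while d*d <= n' trial-division loop of isprime; fuel n.toNat+2 is never exhausted
def trialB : Nat → Int → Int → Bool
  | 0, _, _ => true
  | f+1, n, d => if d*d ≤ n then (if PySem.Int.mod n d = 0 then false else trialB f n (d+1)) else true

def isprimeB (n : Int) : Bool := if n < 2 then false else trialB (n.toNat + 2) n 2

-- the 'while len(result) < ct' band loop of B; fuel ct.toNat+1 is never exhausted
def bandB (ct : Int) : Nat → Int → List Int → List Int
  | 0, _, res => res
  | f+1, base, res =>
    if (res.length : Int) < ct then
      let pl := (PySem.List.pyRange base (base*10) 1).filter (fun n => isprimeB n)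
      let prods := (PySem.List.pyRange 0 (pl.length : Int) 1).foldl (fun acc i =>
          acc ++ (PySem.List.slice pl (some i) none).map
                   (fun q => PySem.List.pyGetD pl i 0 * q)) []
      bandB ct f (base*10) (res ++ pvSortInt prods)
    else res

def brilliant_alt (ct : Int) : List Int :=
  PySem.List.slice (bandB ct (ct.toNat + 1) 1 []) none (some ct)

-- ===== PRECONDITION & SPEC =====
-- For -10 < ct < 0 A returns the first 10+ct band-one products (an artifact of the negative
-- stop in o[0:ct]); B returns [], the intended result for a non-positive count (for ct ≤ -10
-- both return []).
def D_brilliant (ct : Int) : Prop := -10 < ct ∧ ct < 0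
instance (ct : Int) : Decidable (D_brilliant ct) := by unfold D_brilliant; infer_instance
def Spec_brilliant (ct : Int) (out : List Int) : Prop := ¬ D_brilliant ct → out = brilliant_alt ct
instance (ct : Int) (out : List Int) : Decidable (Spec_brilliant ct out) := by unfold Spec_brilliant; infer_instance
def pvDiffWitness_brilliant : Int := (-3)
def pvDiffWitnessOut_brilliant : (List Int) × (List Int) := ([4, 6, 9, 10, 14, 15, 21], [])

-- ===== CLAIM (what is proved, stated in full; the proofs are below) =====
def Claim_unchanged_brilliant : Prop := ∀ (ct : Int), Dom_brilliant ct → Spec_brilliant ct (brilliant ct)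
def Claim_changed_brilliant : Prop := Dom_brilliant (pvDiffWitness_brilliant) ∧ D_brilliant (pvDiffWitness_brilliant) ∧ brilliant (pvDiffWitness_brilliant) = pvDiffWitnessOut_brilliant.1 ∧ brilliant_alt (pvDiffWitness_brilliant) = pvDiffWitnessOut_brilliant.2 ∧ pvDiffWitnessOut_brilliant.1 ≠ pvDiffWitnessOut_brilliant.2
def Claim_exact_brilliant : Prop := ∀ (ct : Int), Dom_brilliant ct → D_brilliant ct → brilliant ct ≠ brilliant_alt ct

-- ===== LEMMAS AND PROOFS =====

-- ---- integer-primality helpers ----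

theorem pvPrime_two_le {n : Int} (h : Nat.Prime n.toNat) : 2 ≤ n := by
  have := h.two_le; omega

theorem pvDvd_toNat_iff {d y : Int} (hd : 0 ≤ d) (hy : 0 ≤ y) :
    d.toNat ∣ y.toNat ↔ d ∣ y := by
  rw [← Int.natCast_dvd_natCast, Int.toNat_of_nonneg hd, Int.toNat_of_nonneg hy]

-- a prime has no prime divisor d with d*d ≤ it
theorem pvPrime_no_small_div {y d : Int} (hy : Nat.Prime y.toNat) (hd : Nat.Prime d.toNat)
    (hdvd : d ∣ y) (hsq : d*d ≤ y) : False := by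
  have hd2 : 2 ≤ d := pvPrime_two_le hd
  have hy2 : 2 ≤ y := pvPrime_two_le hy
  have : d.toNat = 1 ∨ d.toNat = y.toNat :=
    hy.eq_one_or_self_of_dvd d.toNat ((pvDvd_toNat_iff (by omega) (by omega)).mpr hdvd)
  have hdy : d = y := by omega
  nlinarith

-- a composite n ≥ 2 has a prime divisor d with d*d ≤ n
theorem pvComposite_small_div {y : Int} (hy : 2 ≤ y) (hnp : ¬ Nat.Prime y.toNat) :
    ∃ d : Int, 2 ≤ d ∧ d < y ∧ Nat.Prime d.toNat ∧ d ∣ y ∧ d*d ≤ y := by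
  have h1 : y.toNat ≠ 1 := by omega
  have hp := Nat.minFac_prime h1
  have hdvd := Nat.minFac_dvd y.toNat
  have hsq : y.toNat.minFac ^ 2 ≤ y.toNat := Nat.minFac_sq_le_self (by omega) hnp
  refine ⟨(y.toNat.minFac : Int), by exact_mod_cast hp.two_le, ?_, by simpa using hp, ?_, ?_⟩
  · have hle : y.toNat.minFac ≤ y.toNat := Nat.le_of_dvd (by omega) hdvd
    have : y.toNat.minFac ≠ y.toNat := by
      intro he; rw [he] at hsq; nlinarith [hy, Int.toNat_of_nonneg (by omega : (0:Int) ≤ y)]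
    omega
  · rw [← Int.toNat_of_nonneg (by omega : (0:Int) ≤ y)]
    exact_mod_cast hdvd
  · have hsq' : (y.toNat.minFac * y.toNat.minFac : Nat) ≤ y.toNat := by nlinarith [hsq]
    calc ((y.toNat.minFac : Int) * y.toNat.minFac) = ((y.toNat.minFac * y.toNat.minFac : Nat) : Int) := by
            push_cast; ring
      _ ≤ (y.toNat : Int) := by exact_mod_cast hsq'
      _ = y := Int.toNat_of_nonneg (by omega)

-- a number > 3 divisible by 2 or 3 is not prime
theorem pvSmall_div_not_prime {y : Int} (h3 : 3 < y) (h : (2:Int) ∣ y ∨ (3:Int) ∣ y) :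
    ¬ Nat.Prime y.toNat := by
  intro hp
  rcases h with h | h
  · have := hp.eq_one_or_self_of_dvd 2 ((pvDvd_toNat_iff (by omega) (by omega)).mpr h)
    omega
  · have := hp.eq_one_or_self_of_dvd 3 ((pvDvd_toNat_iff (by omega) (by omega)).mpr h)
    omega

-- a prime is 2, 3 or ±1 mod 6
theorem pvPrime_mod6 {y : Int} (hy : Nat.Prime y.toNat) :
    y = 2 ∨ y = 3 ∨ (5 ≤ y ∧ (y % 6 = 1 ∨ y % 6 = 5)) := by
  have h2 := pvPrime_two_le hy
  by_contra hcon
  have h23 : (2:Int) ∣ y ∨ (3:Int) ∣ y := by omega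
  have h3 : 3 < y := by omega
  exact pvSmall_div_not_prime h3 h23 hy

-- ---- pyISqrt = Nat.sqrt ----

theorem pvCountP_sqrt (n : Nat) : ∀ m : Nat,
    (List.range m).countP (fun r => decide (r*r ≤ n)) = min (Nat.sqrt n + 1) m := by
  intro m
  induction m with
  | zero => simp
  | succ m ih =>
    rw [List.range_succ, List.countP_append, ih]
    by_cases h : m * m ≤ n
    · have : m ≤ Nat.sqrt n := Nat.le_sqrt.mpr h
      simp [h]; omega
    · have : ¬ m ≤ Nat.sqrt n := fun hc => h (Nat.le_sqrt.mp hc)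
      simp [h]; omega

theorem pvISqrt_eq (n : Nat) : pyISqrt n = Nat.sqrt n := by
  unfold pyISqrt
  rw [pvCountP_sqrt]
  have := Nat.sqrt_le_self n
  omega

theorem pvSortInt_eq (xs : List Int) : pvSortInt xs = PySem.List.sorted xs (fun x => x) := by
  apply List.eq_of_perm_of_sorted (le := fun a b : Int => a ≤ b)
  · intro a b _ _ h1 h2; omega
  · exact (List.pairwise_mergeSort
      (fun a b c hab hbc => by
        simp only [decide_eq_true_iff] at hab hbc ⊢; omega)
      (fun a b => by
        rcases le_total a b with h | h <;> simp [h])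
      xs).imp (fun h => by simpa using h)
  · exact PySem.List.sorted_pairwise xs (fun x => x)
  · exact (List.mergeSort_perm xs _).trans (PySem.List.sorted_perm xs (fun x => x) false).symm

-- ---- folds of Set.discard / conditional Set.add ----

theorem pvMem_foldl_discard (l : List Int) : ∀ (s : PySem.Set Int) (y : Int),
    (y ∈ l.foldl PySem.Set.discard s ↔ y ∈ s ∧ y ∉ l) := by
  induction l with
  | nil => simp
  | cons x xs ih =>
    intro s y
    simp only [List.foldl_cons, ih, PySem.Set.mem_discard, List.mem_cons]
    constructor
    · rintro ⟨⟨hs, hne⟩, hx⟩; exact ⟨hs, by tauto⟩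
    · rintro ⟨hs, hx⟩; exact ⟨⟨hs, by tauto⟩, by tauto⟩

theorem pvNodup_foldl_discard (l : List Int) : ∀ (s : PySem.Set Int),
    s.Nodup → (l.foldl PySem.Set.discard s).Nodup := by
  induction l with
  | nil => simpa
  | cons x xs ih => intro s hs; exact ih _ (PySem.Set.nodup_discard s x hs)

-- ---- the initial 6k±1 table ----

def InitCond (mx y : Int) : Prop := y = 2 ∨ y = 3 ∨ (5 ≤ y ∧ y ≤ mx ∧ (y % 6 = 1 ∨ y % 6 = 5))

theorem pvInitCond_bounds {mx y : Int} (hmx : 10 ≤ mx) (h : InitCond mx y) : 2 ≤ y ∧ y ≤ mx := by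
  rcases h with rfl | rfl | ⟨h1, h2, _⟩ <;> omega

theorem pvInner6 (i : Int) : PySem.List.pyRange (i-1) (i+2) 2 = [i-1, i+1] := by
  rw [PySem.List.pyRange_of_pos _ _ (by norm_num)]
  rw [if_pos (by omega), show (i + 2 - (i - 1) + 2 - 1) = (4:Int) by ring,
      show ((4:Int)/2).toNat = 2 from rfl, show List.range 2 = [0, 1] from rfl]
  simp only [List.map_cons, List.map_nil, List.cons.injEq, and_true]
  push_cast
  omega

theorem pvMem_add2 {z : Int} (s : PySem.Set Int) (a b : Int) (P Q : Prop)
    [Decidable P] [Decidable Q] :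
    (z ∈ (if Q then (if P then PySem.Set.add s a else s).add b
               else (if P then PySem.Set.add s a else s))
      ↔ z ∈ s ∨ (P ∧ z = a) ∨ (Q ∧ z = b)) := by
  split_ifs <;> simp [PySem.Set.mem_add] <;> tauto

def pvStep (mx : Int) (s : PySem.Set Int) (i : Int) : PySem.Set Int :=
  (PySem.List.pyRange (i-1) (i+2) 2).foldl (fun s j => if j ≤ mx then PySem.Set.add s j else s) s

theorem pvMem_step (mx : Int) (s : PySem.Set Int) (i z : Int) :
    z ∈ pvStep mx s i ↔ z ∈ s ∨ ((i-1 ≤ mx) ∧ z = i-1) ∨ ((i+1 ≤ mx) ∧ z = i+1) := by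
  unfold pvStep
  rw [pvInner6]
  simp only [List.foldl_cons, List.foldl_nil]
  exact pvMem_add2 s (i-1) (i+1) _ _

theorem pvNodup_step (mx : Int) (s : PySem.Set Int) (i : Int) (hs : s.Nodup) :
    (pvStep mx s i).Nodup := by
  unfold pvStep
  rw [pvInner6]
  simp only [List.foldl_cons, List.foldl_nil]
  split_ifs <;>
    first
      | exact PySem.Set.nodup_add _ _ (PySem.Set.nodup_add _ _ hs)
      | exact PySem.Set.nodup_add _ _ hs
      | exact hs

theorem pvMem_initfold (mx : Int) (l : List Int) : ∀ (s : PySem.Set Int) (y : Int),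
    (y ∈ l.foldl (pvStep mx) s
      ↔ y ∈ s ∨ ∃ i ∈ l, (y = i-1 ∨ y = i+1) ∧ y ≤ mx) := by
  induction l with
  | nil => simp
  | cons i l ih =>
    intro s y
    rw [List.foldl_cons, ih, pvMem_step]
    simp only [List.mem_cons]
    constructor
    · rintro ((h | ⟨hP, rfl⟩ | ⟨hQ, rfl⟩) | ⟨j, hj, hyj, hle⟩)
      · exact Or.inl h
      · exact Or.inr ⟨i, Or.inl rfl, Or.inl rfl, hP⟩
      · exact Or.inr ⟨i, Or.inl rfl, Or.inr rfl, hQ⟩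
      · exact Or.inr ⟨j, Or.inr hj, hyj, hle⟩
    · rintro (h | ⟨j, rfl | hj, rfl | rfl, hle⟩)
      · exact Or.inl (Or.inl h)
      · exact Or.inl (Or.inr (Or.inl ⟨hle, rfl⟩))
      · exact Or.inl (Or.inr (Or.inr ⟨hle, rfl⟩))
      · exact Or.inr ⟨j, hj, Or.inl rfl, hle⟩
      · exact Or.inr ⟨j, hj, Or.inr rfl, hle⟩

theorem pvNodup_initfold (mx : Int) (l : List Int) : ∀ (s : PySem.Set Int),
    s.Nodup → (l.foldl (pvStep mx) s).Nodup := by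
  induction l with
  | nil => simpa
  | cons i l ih => intro s hs; exact ih _ (pvNodup_step mx s i hs)

def pvInit (mx : Int) : PySem.Set Int :=
  (PySem.List.pyRange 6 (mx+2) 6).foldl (pvStep mx) (PySem.Set.ofList (PySem.List.pyRange 2 4 1))

theorem pvMem_pvInit (mx : Int) (hmx : 10 ≤ mx) (y : Int) :
    y ∈ pvInit mx ↔ InitCond mx y := by
  unfold pvInit
  rw [pvMem_initfold]
  have hbase : PySem.Set.ofList (PySem.List.pyRange 2 4 1) = ([2,3] : List Int) := by decide
  rw [hbase]
  unfold InitCond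
  constructor
  · rintro (h | ⟨i, hi, hyi, hle⟩)
    · simp at h; omega
    · rw [PySem.List.mem_pyRange_iff_of_pos (by norm_num)] at hi
      obtain ⟨h1, h2, h3⟩ := hi
      omega
  · intro h
    rcases h with rfl | rfl | ⟨h5, hmxy, h1 | h5'⟩
    · left; simp
    · left; simp
    · right; refine ⟨y - 1, ?_, by omega, by omega⟩
      rw [PySem.List.mem_pyRange_iff_of_pos (by norm_num)]
      omega
    · right; refine ⟨y + 1, ?_, by omega, by omega⟩
      rw [PySem.List.mem_pyRange_iff_of_pos (by norm_num)]
      omega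

-- ---- the deque-generated divisor stream 2,3,5,7,11,13,17,19,23,25,… ----

def qOf (p : Int) : List Int :=
  if p = 2 then [3,5,7] else if p = 3 then [5,7] else if p = 5 then [7]
  else if p % 6 = 1 then [p+4, p+6] else [p+2]

def nxt (p : Int) : Int :=
  if p = 2 then 3 else if p = 3 then 5 else if p = 5 then 7
  else if p % 6 = 1 then p+4 else p+2

def DivOK (p : Int) : Prop := p = 2 ∨ p = 3 ∨ p = 5 ∨ (7 ≤ p ∧ (p % 6 = 1 ∨ p % 6 = 5))

theorem pvDivOK_two_le {p : Int} (h : DivOK p) : 2 ≤ p := by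
  rcases h with rfl | rfl | rfl | ⟨h, _⟩ <;> omega

theorem pvQueue_step {p : Int} (h : DivOK p) :
    ((if (qOf p).length < 2 then
        (qOf p ++ [(qOf p).getLastD 0 + 4]) ++ [(qOf p ++ [(qOf p).getLastD 0 + 4]).getLastD 0 + 2]
      else qOf p).headI = nxt p) ∧
    ((if (qOf p).length < 2 then
        (qOf p ++ [(qOf p).getLastD 0 + 4]) ++ [(qOf p ++ [(qOf p).getLastD 0 + 4]).getLastD 0 + 2]
      else qOf p).tail = qOf (nxt p)) ∧
    DivOK (nxt p) ∧ p < nxt p ∧ nxt p ≤ p + 4 := by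
  rcases h with rfl | rfl | rfl | ⟨h7, h1 | h5⟩
  · norm_num [qOf, nxt, DivOK]
  · norm_num [qOf, nxt, DivOK]
  · norm_num [qOf, nxt, DivOK]
  · have e2 : p ≠ 2 := by omega
    have e3 : p ≠ 3 := by omega
    have e5 : p ≠ 5 := by omega
    have f2 : p + 4 ≠ 2 := by omega
    have f3 : p + 4 ≠ 3 := by omega
    have f5 : p + 4 ≠ 5 := by omega
    have fm : ¬ ((p + 4) % 6 = 1) := by omega
    simp [qOf, nxt, e2, e3, e5, f2, f3, f5, h1, fm, DivOK]
    omega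
  · have e2 : p ≠ 2 := by omega
    have e3 : p ≠ 3 := by omega
    have e5 : p ≠ 5 := by omega
    have em : ¬ (p % 6 = 1) := by omega
    have f2 : p + 2 ≠ 2 := by omega
    have f3 : p + 2 ≠ 3 := by omega
    have f5 : p + 2 ≠ 5 := by omega
    have fm : (p + 2) % 6 = 1 := by omega
    simp [qOf, nxt, e2, e3, e5, em, f2, f3, f5, fm, DivOK]
    omega

theorem pvGap {p : Int} (h : DivOK p) : ∀ d, p < d → d < nxt p → ¬ Nat.Prime d.toNat := by
  rcases h with rfl | rfl | rfl | ⟨h7, h1 | h5⟩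
  · intro d h1 h2; simp [nxt] at h2; omega
  · intro d h1 h2
    have : d = 4 := by simp [nxt] at h2; omega
    subst this; decide
  · intro d h1 h2
    have : d = 6 := by simp [nxt] at h2; omega
    subst this; decide
  · intro d hd1 hd2
    have e2 : p ≠ 2 := by omega
    have e3 : p ≠ 3 := by omega
    have e5 : p ≠ 5 := by omega
    simp [nxt, e2, e3, e5, h1] at hd2
    exact pvSmall_div_not_prime (by omega) (by omega)
  · intro d hd1 hd2
    have e2 : p ≠ 2 := by omega
    have e3 : p ≠ 3 := by omega
    have e5 : p ≠ 5 := by omega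
    have em : ¬ (p % 6 = 1) := by omega
    simp [nxt, e2, e3, e5, em] at hd2
    exact pvSmall_div_not_prime (by omega) (by omega)

-- ---- bracket facts for mr = isqrt(mx) ----

theorem pvLe_mr_iff {mx d : Int} (hmx : 0 ≤ mx) (hd : 0 ≤ d) :
    d ≤ ((pyISqrt mx.toNat : Nat) : Int) ↔ d*d ≤ mx := by
  rw [pvISqrt_eq]
  have hcast : d * d = ((d.toNat * d.toNat : Nat) : Int) := by
    push_cast [Int.toNat_of_nonneg hd]; ring
  rw [hcast]
  constructor
  · intro h
    have h1 : d.toNat ≤ Nat.sqrt mx.toNat := by omega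
    have h2 := Nat.le_sqrt.mp h1
    have h3 : ((d.toNat * d.toNat : Nat) : Int) ≤ ((mx.toNat : Nat) : Int) := by exact_mod_cast h2
    omega
  · intro h
    have h1 : (d.toNat * d.toNat : Nat) ≤ mx.toNat := by omega
    have h2 := Nat.le_sqrt.mpr h1
    omega

theorem pvMr_le {mx : Int} (hmx : 10 ≤ mx) : ((pyISqrt mx.toNat : Nat) : Int) ≤ mx := by
  have h0 : (0:Int) ≤ ((pyISqrt mx.toNat : Nat) : Int) := by positivity
  have h := (pvLe_mr_iff (by omega) h0).mp le_rfl
  nlinarith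

-- ---- the sieve loop ----

theorem pvSieve_exit {mx mr p : Int} (hmx : 10 ≤ mx) (hmr : mr = ((pyISqrt mx.toNat : Nat) : Int))
    (hp : mr < p) (s : PySem.Set Int)
    (hchar : ∀ y, y ∈ s ↔ InitCond mx y ∧
        ∀ d, 2 ≤ d → d < p → Nat.Prime d.toNat → ¬(d ∣ y ∧ d*d ≤ y)) :
    ∀ y, y ∈ s ↔ (y ≤ mx ∧ Nat.Prime y.toNat) := by
  intro y
  rw [hchar]
  constructor
  · rintro ⟨hic, hcl⟩
    obtain ⟨hy2, hymx⟩ := pvInitCond_bounds hmx hic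
    refine ⟨hymx, ?_⟩
    by_contra hnp
    obtain ⟨d, hd2, hdy, hdp, hddvd, hdsq⟩ := pvComposite_small_div hy2 hnp
    have hdmr : d ≤ mr := by
      rw [hmr]; exact (pvLe_mr_iff (by omega) (by omega)).mpr (le_trans hdsq hymx)
    exact hcl d hd2 (by omega) hdp ⟨hddvd, hdsq⟩
  · rintro ⟨hymx, hpr⟩
    have hy2 : 2 ≤ y := pvPrime_two_le hpr
    refine ⟨?_, ?_⟩
    · rcases pvPrime_mod6 hpr with rfl | rfl | ⟨h5, hm⟩
      · exact Or.inl rfl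
      · exact Or.inr (Or.inl rfl)
      · exact Or.inr (Or.inr ⟨h5, hymx, hm⟩)
    · rintro d _ _ hdp ⟨hdvd, hsq⟩
      exact pvPrime_no_small_div hpr hdp hdvd hsq

theorem pvSieve_main (mx mr : Int) (hmx : 10 ≤ mx) (hmr : mr = ((pyISqrt mx.toNat : Nat) : Int)) :
    ∀ (fuel : Nat) (p : Int) (s : PySem.Set Int), DivOK p →
    (mr + 1 - p).toNat ≤ fuel → s.Nodup →
    (∀ y, y ∈ s ↔ InitCond mx y ∧
        ∀ d, 2 ≤ d → d < p → Nat.Prime d.toNat → ¬(d ∣ y ∧ d*d ≤ y)) →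
    (pySieve mx mr fuel s (qOf p) p).Nodup ∧
    (∀ y, y ∈ pySieve mx mr fuel s (qOf p) p ↔ (y ≤ mx ∧ Nat.Prime y.toNat)) := by
  intro fuel
  induction fuel with
  | zero =>
    intro p s hok hfuel hnd hchar
    have hple : mr < p := by omega
    exact ⟨hnd, pvSieve_exit hmx hmr hple s hchar⟩
  | succ f ih =>
    intro p s hok hfuel hnd hchar
    by_cases hple : p ≤ mr
    case neg =>
      simp only [pySieve, if_neg hple]
      exact ⟨hnd, pvSieve_exit hmx hmr (by omega) s hchar⟩
    case pos =>
      obtain ⟨hhead, htail, hok', hlt, hle4⟩ := pvQueue_step hok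
      have hp2 : 2 ≤ p := pvDivOK_two_le hok
      cases hb : PySem.Set.contains s p with
      | true =>
        -- p is in the set, hence (by the invariant) prime: discard its multiples
        have hpmem : p ∈ s := (PySem.Set.contains_iff s p).mp hb
        obtain ⟨hicp, hclp⟩ := (hchar p).mp hpmem
        have hpr : Nat.Prime p.toNat := by
          by_contra hnp
          obtain ⟨d, hd2, hdp, hdprime, hdvd, hsq⟩ := pvComposite_small_div hp2 hnp
          exact hclp d hd2 hdp hdprime ⟨hdvd, hsq⟩
        simp only [pySieve, if_pos hple, hb, if_true, hhead, htail]
        apply ih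
        · exact hok'
        · omega
        · exact pvNodup_foldl_discard _ _ hnd
        · intro y
          rw [pvMem_foldl_discard, hchar]
          constructor
          · rintro ⟨⟨hic, hcl⟩, hnr⟩
            refine ⟨hic, ?_⟩
            rintro d hd2 hdlt hdpr hdd
            rcases lt_trichotomy d p with h | rfl | h
            · exact hcl d hd2 h hdpr hdd
            · apply hnr
              rw [PySem.List.mem_pyRange_iff_of_pos (by omega : (0:Int) < d)]
              refine ⟨hdd.2, ?_, ?_⟩
              · have := (pvInitCond_bounds hmx hic).2; omega
              · exact dvd_sub hdd.1 (dvd_mul_right d d)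
            · exact absurd hdpr (pvGap hok d h hdlt)
          · rintro ⟨hic, hcl⟩
            refine ⟨⟨hic, fun d hd2 hdlt hdpr hdd => hcl d hd2 (by omega) hdpr hdd⟩, ?_⟩
            intro hyr
            rw [PySem.List.mem_pyRange_iff_of_pos (by omega : (0:Int) < p)] at hyr
            obtain ⟨h1, h2, h3⟩ := hyr
            have hpy : p ∣ y := by
              have h4 := dvd_add h3 (dvd_mul_right p p)
              simpa using h4
            exact hcl p hp2 hlt hpr ⟨hpy, h1⟩
      | false =>
        -- p is not in the set, hence not prime: nothing to discard
        have hpnot : p ∉ s := fun hmem => by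
          rw [(PySem.Set.contains_iff s p).mpr hmem] at hb; cases hb
        have hpr : ¬ Nat.Prime p.toNat := by
          intro hpr
          apply hpnot
          rw [hchar]
          refine ⟨?_, ?_⟩
          · rcases pvPrime_mod6 hpr with rfl | rfl | ⟨h5, hm⟩
            · exact Or.inl rfl
            · exact Or.inr (Or.inl rfl)
            · refine Or.inr (Or.inr ⟨h5, ?_, hm⟩)
              have := pvMr_le (mx := mx) hmx
              omega
          · rintro d _ _ hdp ⟨hdvd, hsq⟩
            exact pvPrime_no_small_div hpr hdp hdvd hsq
        simp only [pySieve, if_pos hple, hb, Bool.false_eq_true, if_false, hhead, htail]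
        apply ih
        · exact hok'
        · omega
        · exact hnd
        · intro y
          rw [hchar]
          constructor
          · rintro ⟨hic, hcl⟩
            refine ⟨hic, ?_⟩
            intro d hd2 hdlt hdpr hdd
            rcases lt_trichotomy d p with h | rfl | h
            · exact hcl d hd2 h hdpr hdd
            · exact absurd hdpr hpr
            · exact absurd hdpr (pvGap hok d h hdlt)
          · rintro ⟨hic, hcl⟩
            exact ⟨hic, fun d hd2 hdlt hdpr hdd => hcl d hd2 (by omega) hdpr hdd⟩

theorem pvGenprimes_eq (mx : Int) (hmx : 10 ≤ mx) :
    genprimesA mx = (PySem.List.pyRange 2 (mx+1) 1).filter (fun n => decide (Nat.Prime n.toNat)) := by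
  have hinit_char : ∀ y, y ∈ pvInit mx ↔ InitCond mx y ∧
      ∀ d, 2 ≤ d → d < 2 → Nat.Prime d.toNat → ¬(d ∣ y ∧ d*d ≤ y) := by
    intro y
    rw [pvMem_pvInit mx hmx]
    exact ⟨fun h => ⟨h, fun d h2 hl => by omega⟩, fun h => h.1⟩
  have hnodup : (pvInit mx).Nodup :=
    pvNodup_initfold mx _ _ (PySem.Set.nodup_ofList _)
  obtain ⟨hnd, hchar⟩ := pvSieve_main mx ((pyISqrt mx.toNat : Nat) : Int) hmx rfl
      (mx.toNat + 4) 2 (pvInit mx) (Or.inl rfl)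
      (by have := pvMr_le (mx := mx) hmx; omega) hnodup hinit_char
  show pvSortInt
      (pySieve mx ((pyISqrt mx.toNat : Nat) : Int) (mx.toNat + 4) (pvInit mx) [3,5,7] 2) = _
  rw [pvSortInt_eq]
  rw [show ([3,5,7] : List Int) = qOf 2 by norm_num [qOf]]
  apply PySem.List.sorted_eq_of_perm_of_pairwise_lt
  · rw [List.perm_ext_iff_of_nodup ((PySem.List.nodup_pyRange_one 2 (mx+1)).filter _) hnd]
    intro a
    rw [List.mem_filter, hchar, PySem.List.mem_pyRange_one, decide_eq_true_iff]
    constructor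
    · rintro ⟨⟨h1, h2⟩, hp⟩
      exact ⟨by omega, hp⟩
    · rintro ⟨hmxy, hp⟩
      exact ⟨⟨pvPrime_two_le hp, by omega⟩, hp⟩
  · exact (PySem.List.pairwise_lt_pyRange_one 2 (mx+1)).filter _

-- ---- trial division (port B's primality test) ----

theorem pvTrialB_correct : ∀ (f : Nat) (n d : Int), 2 ≤ d →
    n.toNat + 2 ≤ f + d.toNat →
    (trialB f n d = true ↔ ∀ e, d ≤ e → e*e ≤ n → ¬ e ∣ n) := by
  intro f
  induction f with
  | zero =>
    intro n d hd hfuel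
    simp only [trialB, true_iff]
    intro e he hsq hdvd
    have h1 : n + 2 ≤ d := by omega
    have h2 : e ≤ e*e := by nlinarith
    linarith
  | succ f ih =>
    intro n d hd hfuel
    simp only [trialB]
    by_cases hsq : d*d ≤ n
    case neg =>
      rw [if_neg hsq]
      constructor
      · intro _ e he hesq hedvd
        have h2 : d*d ≤ e*e := by nlinarith
        linarith
      · intro _
        rfl
    case pos =>
      rw [if_pos hsq]
      by_cases hdvd : PySem.Int.mod n d = 0
      case pos =>
        rw [if_pos hdvd]
        constructor
        · intro h; cases h
        · intro h
          exact absurd ((PySem.Int.mod_eq_zero_iff_dvd n d).mp hdvd) (h d le_rfl hsq)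
      case neg =>
        rw [if_neg hdvd]
        have hndvd : ¬ d ∣ n := fun h => hdvd ((PySem.Int.mod_eq_zero_iff_dvd n d).mpr h)
        rw [ih n (d+1) (by omega) (by omega)]
        constructor
        · intro h e he hesq hedvd
          rcases eq_or_lt_of_le he with rfl | hlt
          · exact hndvd hedvd
          · exact h e (by omega) hesq hedvd
        · intro h e he hesq hedvd
          exact h e (by omega) hesq hedvd

theorem pvIsprimeB_iff (n : Int) : isprimeB n = true ↔ Nat.Prime n.toNat := by
  unfold isprimeB
  by_cases h2 : n < 2
  case pos =>
    rw [if_pos h2]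
    simp only [Bool.false_eq_true, false_iff]
    intro hp
    have := hp.two_le
    omega
  case neg =>
    rw [if_neg h2]
    rw [pvTrialB_correct (n.toNat + 2) n 2 (by omega) (by omega)]
    constructor
    · intro h
      rw [Nat.prime_def_le_sqrt]
      refine ⟨by omega, ?_⟩
      intro m hm2 hmsq hmdvd
      have hmm : (m*m : Nat) ≤ n.toNat := Nat.le_sqrt.mp hmsq
      refine h (m : Int) (by exact_mod_cast hm2) ?_ ?_
      · have : ((m*m : Nat) : Int) ≤ ((n.toNat : Nat) : Int) := by exact_mod_cast hmm
        push_cast at this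
        omega
      · rw [← Int.toNat_of_nonneg (by omega : (0:Int) ≤ n)]
        exact_mod_cast hmdvd
    · intro hp e he hesq hedvd
      have he0 : (0:Int) ≤ e := by omega
      have : e.toNat ∣ n.toNat := (pvDvd_toNat_iff he0 (by omega)).mpr hedvd
      have := hp.eq_one_or_self_of_dvd e.toNat this
      have hen : e = n := by omega
      subst hen
      nlinarith

-- ---- the two per-band prime lists agree ----

theorem pvNot_prime_10base {base : Int} (hk : ∃ k : ℕ, base = 10^k) :
    ¬ Nat.Prime ((base*10).toNat) := by
  obtain ⟨k, rfl⟩ := hk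
  intro hp
  have hb1 : (1:Int) ≤ 10^k := one_le_pow₀ (by norm_num)
  have h2 : (2:Int) ∣ 10^k * 10 := ⟨10^k * 5, by ring⟩
  have := hp.eq_one_or_self_of_dvd 2 ((pvDvd_toNat_iff (by omega) (by omega)).mpr h2)
  omega

theorem pvIsprimeB_eq_decide (x : Int) : isprimeB x = decide (Nat.Prime x.toNat) := by
  by_cases hp : Nat.Prime x.toNat
  · simp [(pvIsprimeB_iff x).mpr hp, hp]
  · have hb : isprimeB x = false := by
      rcases Bool.eq_false_or_eq_true (isprimeB x) with h | h
      · exact absurd ((pvIsprimeB_iff x).mp h) hp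
      · exact h
    rw [hb, eq_comm]
    exact decide_eq_false hp

theorem pvBandlist_eq {base : Int} (hk : ∃ k : ℕ, base = 10^k) :
    (genprimesA (base*10)).filter (fun x => decide (base ≤ x)) =
    (PySem.List.pyRange base (base*10) 1).filter (fun n => isprimeB n) := by
  have hb1 : (1:Int) ≤ base := by
    obtain ⟨k, rfl⟩ := hk; exact one_le_pow₀ (by norm_num)
  rw [pvGenprimes_eq (base*10) (by omega)]
  rw [List.filter_filter]
  have hfe : (PySem.List.pyRange base (base*10) 1).filter (fun n => isprimeB n) =
      (PySem.List.pyRange base (base*10) 1).filter (fun n => decide (Nat.Prime n.toNat)) := by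
    apply List.filter_congr
    intro x _
    exact pvIsprimeB_eq_decide x
  rw [hfe]
  rcases eq_or_lt_of_le hb1 with hbase1 | hbase2
  · -- base = 1
    rw [← hbase1]
    rw [show (1:Int)*10 + 1 = 10 + 1 by norm_num, show (1:Int)*10 = 10 by norm_num]
    rw [PySem.List.pyRange_one_succ_right (by norm_num : (2:Int) ≤ 10)]
    rw [show PySem.List.pyRange 1 10 1 =
        PySem.List.pyRange 1 2 1 ++ PySem.List.pyRange 2 10 1 from
      PySem.List.pyRange_one_append 1 2 10 (by norm_num) (by norm_num)]
    rw [List.filter_append, List.filter_append]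
    have h1 : (PySem.List.pyRange 1 2 1).filter (fun n => decide (Nat.Prime n.toNat)) = [] := by
      decide
    have h2 : (([10] : List Int)).filter
        (fun a => decide ((1:Int) ≤ a) && decide (Nat.Prime a.toNat)) = [] := by decide
    rw [h1, h2]
    simp only [List.nil_append, List.append_nil]
    apply List.filter_congr
    intro x hx
    rw [PySem.List.mem_pyRange_one] at hx
    simp [show (1:Int) ≤ x by omega]
  · -- base ≥ 2
    have h2b : (2:Int) ≤ base := by omega
    rw [show PySem.List.pyRange 2 (base*10+1) 1 =
        PySem.List.pyRange 2 base 1 ++ PySem.List.pyRange base (base*10+1) 1 from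
      PySem.List.pyRange_one_append 2 base (base*10+1) h2b (by nlinarith)]
    rw [PySem.List.pyRange_one_succ_right (by nlinarith : base ≤ base*10)]
    rw [List.filter_append, List.filter_append]
    have hlow : (PySem.List.pyRange 2 base 1).filter
        (fun a => decide (base ≤ a) && decide (Nat.Prime a.toNat)) = [] := by
      rw [List.filter_eq_nil_iff]
      intro a ha
      rw [PySem.List.mem_pyRange_one] at ha
      simp [show ¬ (base ≤ a) by omega]
    have hhigh : (([base*10] : List Int)).filter
        (fun a => decide (base ≤ a) && decide (Nat.Prime a.toNat)) = [] := by
      have := pvNot_prime_10base (base := base) hk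
      simp [this]
    rw [hlow, hhigh]
    simp only [List.nil_append, List.append_nil]
    apply List.filter_congr
    intro x hx
    rw [PySem.List.mem_pyRange_one] at hx
    simp [show base ≤ x by omega]

-- ---- the per-band product list ----

def pvProds (pl : List Int) : List Int :=
  (PySem.List.pyRange 0 (pl.length : Int) 1).flatMap
    (fun i => (pl.drop i.toNat).map (fun q => PySem.List.pyGetD pl i 0 * q))

theorem pvFoldl_nested_add (l : List Int) (g : Int → List Int) :
    ∀ (out : PySem.Set Int),
    l.foldl (fun o i => (g i).foldl (fun o x => PySem.Set.add o x) o) out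
      = (l.flatMap g).foldl (fun o x => PySem.Set.add o x) out := by
  induction l with
  | nil => intro out; simp
  | cons i l ih => intro out; simp [List.flatMap_cons, List.foldl_append, ih]

theorem pvBandA_fold (pl : List Int) (out : PySem.Set Int) :
    (PySem.List.pyRange 0 (pl.length : Int) 1).foldl (fun o ai =>
        (PySem.List.pyRange ai (pl.length : Int) 1).foldl (fun o bi =>
           PySem.Set.add o (PySem.List.pyGetD pl ai 0 * PySem.List.pyGetD pl bi 0)) o) out
      = PySem.Set.update out (pvProds pl) := by
  have hinner : ∀ (ai : Int), 0 ≤ ai → ∀ (o : PySem.Set Int),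
      (PySem.List.pyRange ai (pl.length : Int) 1).foldl (fun o bi =>
        PySem.Set.add o (PySem.List.pyGetD pl ai 0 * PySem.List.pyGetD pl bi 0)) o
      = ((pl.drop ai.toNat).map (fun q => PySem.List.pyGetD pl ai 0 * q)).foldl
          (fun o x => PySem.Set.add o x) o := by
    intro ai hai o
    rw [← PySem.List.map_pyGetD_pyRange' pl 0 hai, List.map_map, List.foldl_map]
    rfl
  have hcong : (PySem.List.pyRange 0 (pl.length : Int) 1).foldl (fun o ai =>
        (PySem.List.pyRange ai (pl.length : Int) 1).foldl (fun o bi =>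
           PySem.Set.add o (PySem.List.pyGetD pl ai 0 * PySem.List.pyGetD pl bi 0)) o) out
      = (PySem.List.pyRange 0 (pl.length : Int) 1).foldl (fun o ai =>
          ((pl.drop ai.toNat).map (fun q => PySem.List.pyGetD pl ai 0 * q)).foldl
            (fun o x => PySem.Set.add o x) o) out := by
    apply PySem.List.foldl_congr_mem
    intro acc x hx
    rw [PySem.List.mem_pyRange_one] at hx
    exact hinner x hx.1 acc
  rw [hcong, pvFoldl_nested_add]
  rfl

theorem pvPyGetD_mem {pl : List Int} {i : Int} (h0 : 0 ≤ i) (hlt : i < (pl.length : Int)) :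
    PySem.List.pyGetD pl i 0 ∈ pl ∧ PySem.List.pyGetD pl i 0 = pl.getD i.toNat 0 := by
  have he : PySem.List.pyGetD pl i 0 = pl.getD i.toNat 0 := PySem.List.pyGetD_of_nonneg pl 0 h0
  have hl : i.toNat < pl.length := by omega
  refine ⟨?_, he⟩
  rw [he, List.getD_eq_getElem pl 0 hl]
  exact List.getElem_mem hl

theorem pvProds_bounds {pl : List Int} {lo hi : Int} (hlo : 1 ≤ lo)
    (h : ∀ x ∈ pl, lo ≤ x ∧ x < hi) :
    ∀ z ∈ pvProds pl, lo*lo ≤ z ∧ z < hi*hi := by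
  intro z hz
  unfold pvProds at hz
  rw [List.mem_flatMap] at hz
  obtain ⟨i, hi_mem, hz⟩ := hz
  rw [PySem.List.mem_pyRange_one] at hi_mem
  rw [List.mem_map] at hz
  obtain ⟨q, hq, rfl⟩ := hz
  obtain ⟨hp_mem, _⟩ := pvPyGetD_mem hi_mem.1 hi_mem.2
  have hq' : q ∈ pl := List.mem_of_mem_drop hq
  obtain ⟨hp1, hp2⟩ := h _ hp_mem
  obtain ⟨hq1, hq2⟩ := h _ hq'
  constructor <;> nlinarith

theorem pvDrop_ge {pl : List Int} (hsort : pl.Pairwise (·<·)) {m : Nat} (hm : m < pl.length) :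
    ∀ q ∈ pl.drop m, pl[m] ≤ q := by
  intro q hq
  rw [List.mem_drop_iff_getElem] at hq
  obtain ⟨j, hj, rfl⟩ := hq
  rcases Nat.eq_zero_or_pos j with rfl | hjpos
  · simp
  · exact le_of_lt ((List.pairwise_iff_getElem.mp hsort) m (m+j) hm (by omega) (by omega))

theorem pvProds_nodup {pl : List Int} (hsort : pl.Pairwise (·<·))
    (hpr : ∀ x ∈ pl, Nat.Prime x.toNat) : (pvProds pl).Nodup := by
  unfold pvProds
  rw [List.nodup_flatMap]
  have hnd : pl.Nodup := hsort.imp ne_of_lt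
  constructor
  · intro i hi_mem
    rw [PySem.List.mem_pyRange_one] at hi_mem
    obtain ⟨hp_mem, _⟩ := pvPyGetD_mem hi_mem.1 hi_mem.2
    have hp2 : 2 ≤ PySem.List.pyGetD pl i 0 := pvPrime_two_le (hpr _ hp_mem)
    exact ((List.drop_sublist i.toNat pl).nodup hnd).map (mul_right_injective₀ (by omega))
  · apply (PySem.List.pairwise_lt_pyRange_one 0 (pl.length : Int)).imp_of_mem
    intro i j hi hj hij
    rw [PySem.List.mem_pyRange_one] at hi hj
    intro z hz1 hz2
    rw [List.mem_map] at hz1 hz2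
    obtain ⟨q, hq, hzq⟩ := hz1
    obtain ⟨q', hq', hzq'⟩ := hz2
    obtain ⟨hpi_mem, hpi_eq⟩ := pvPyGetD_mem hi.1 hi.2
    obtain ⟨hpj_mem, hpj_eq⟩ := pvPyGetD_mem hj.1 hj.2
    set pi := PySem.List.pyGetD pl i 0 with hpi
    set pj := PySem.List.pyGetD pl j 0 with hpj
    have hilt : i.toNat < j.toNat := by omega
    have hjlen : j.toNat < pl.length := by omega
    have hpilt : pi < pj := by
      rw [hpi_eq, hpj_eq, List.getD_eq_getElem pl 0 (by omega), List.getD_eq_getElem pl 0 hjlen]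
      exact (List.pairwise_iff_getElem.mp hsort) i.toNat j.toNat (by omega) hjlen hilt
    have hqge : pi ≤ q := by
      have := pvDrop_ge hsort (m := i.toNat) (by omega) q hq
      rw [hpi_eq, List.getD_eq_getElem pl 0 (by omega)]
      exact this
    have hq'ge : pj ≤ q' := by
      have := pvDrop_ge hsort (m := j.toNat) hjlen q' hq'
      rw [hpj_eq, List.getD_eq_getElem pl 0 hjlen]
      exact this
    -- primality of all four factors
    have hppi := hpr _ hpi_mem
    have hppj := hpr _ hpj_mem
    have hpq := hpr _ (List.mem_of_mem_drop hq)
    have hpq' := hpr _ (List.mem_of_mem_drop hq')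
    have h2pi := pvPrime_two_le hppi
    have h2pj := pvPrime_two_le hppj
    have h2q := pvPrime_two_le hpq
    have h2q' := pvPrime_two_le hpq'
    -- transfer the product equality to ℕ
    have heq : pi * q = pj * q' := hzq.trans hzq'.symm
    have heqN : pi.toNat * q.toNat = pj.toNat * q'.toNat := by
      have h1 : ((pi.toNat * q.toNat : Nat) : Int) = pi * q := by
        push_cast [Int.toNat_of_nonneg (by omega : (0:Int) ≤ pi),
                   Int.toNat_of_nonneg (by omega : (0:Int) ≤ q)]; ring
      have h2 : ((pj.toNat * q'.toNat : Nat) : Int) = pj * q' := by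
        push_cast [Int.toNat_of_nonneg (by omega : (0:Int) ≤ pj),
                   Int.toNat_of_nonneg (by omega : (0:Int) ≤ q')]; ring
      have := h1.trans (heq.trans h2.symm)
      exact_mod_cast this
    have hdvd : pj.toNat ∣ pi.toNat * q.toNat := ⟨q'.toNat, heqN⟩
    rcases (hppj.dvd_mul).mp hdvd with hca | hcb
    · have := (Nat.prime_dvd_prime_iff_eq hppj hppi).mp hca
      omega
    · have hbe := (Nat.prime_dvd_prime_iff_eq hppj hpq).mp hcb
      -- pj = q, so pi = q' and pj ≤ q' = pi < pj
      have hq_eq : q = pj := by omega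
      have : pi * pj = pj * q' := by rw [hq_eq] at heq; exact heq
      have hpi_eq' : pi = q' := by
        have hpj0 : pj ≠ 0 := by omega
        have := mul_left_cancel₀ hpj0 ((by rw [mul_comm]; exact this) : pj * pi = pj * q')
        omega
      omega

-- ---- sorted lists of disjoint blocks concatenate ----

theorem pvSorted_lt (l : List Int) (hnd : l.Nodup) :
    (PySem.List.sorted l (fun x => x)).Pairwise (·<·) := by
  have hle := PySem.List.sorted_pairwise l (fun x => x)
  have hnd' : (PySem.List.sorted l (fun x => x)).Nodup :=
    (PySem.List.sorted_perm l (fun x => x) false).nodup_iff.mpr hnd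
  exact (hle.and hnd').imp (fun h => lt_of_le_of_ne h.1 h.2)

theorem pvSorted_append (out P : List Int) (hndO : out.Nodup) (hndP : P.Nodup)
    (hcross : ∀ x ∈ out, ∀ y ∈ P, x < y) :
    PySem.List.sorted (out ++ P) (fun x => x) =
      PySem.List.sorted out (fun x => x) ++ PySem.List.sorted P (fun x => x) := by
  apply PySem.List.sorted_eq_of_perm_of_pairwise_lt
  · exact (PySem.List.sorted_perm out (fun x => x) false).append
      (PySem.List.sorted_perm P (fun x => x) false)
  · rw [List.pairwise_append]
    refine ⟨pvSorted_lt out hndO, pvSorted_lt P hndP, ?_⟩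
    intro a ha b hb
    exact hcross a ((PySem.List.sorted_perm out (fun x => x) false).mem_iff.mp ha)
      b ((PySem.List.sorted_perm P (fun x => x) false).mem_iff.mp hb)

-- ---- the band loops agree ----

theorem pvBandB_noop (ct : Int) (f : Nat) (b : Int) (res : List Int)
    (h : ¬ ((res.length : Int) < ct)) : bandB ct f b res = res := by
  cases f with
  | zero => rfl
  | succ f => simp only [bandB, if_neg h]

theorem pvBand_eq (ct : Int) : ∀ (f : Nat) (base : Int) (out : PySem.Set Int),
    (∃ k : ℕ, base = 10^k) → out.Nodup → (∀ x ∈ out, x < base*base) →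
    ((out.length : Int) < ct) →
    bandB ct f base (PySem.List.sorted out (fun x => x)) =
      PySem.List.sorted (bandA ct f base out) (fun x => x) := by
  intro f
  induction f with
  | zero =>
    intro base out _ _ _ _
    simp only [bandA, bandB]
  | succ f ih =>
    intro base out hk hnd hbound hlen
    have hb1 : (1:Int) ≤ base := by
      obtain ⟨k, rfl⟩ := hk; exact one_le_pow₀ (by norm_num)
    have hlenB : (((PySem.List.sorted out (fun x => x)).length : Int)) < ct := by
      rw [PySem.List.length_sorted]; exact hlen
    simp only [bandA, bandB, if_pos hlenB]
    rw [pvBandlist_eq hk, pvBandA_fold]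
    set pl := (PySem.List.pyRange base (base*10) 1).filter (fun n => isprimeB n) with hpl
    -- B's accumulated product list is pvProds pl
    have hBprods : (PySem.List.pyRange 0 (pl.length : Int) 1).foldl (fun acc i =>
        acc ++ (PySem.List.slice pl (some i) none).map
                 (fun q => PySem.List.pyGetD pl i 0 * q)) [] = pvProds pl := by
      rw [PySem.List.foldl_append_eq_flatMap]
      rw [List.nil_append]
      unfold pvProds
      rw [List.flatMap_def, List.flatMap_def]
      congr 1
      apply List.map_congr_left
      intro i hi
      rw [PySem.List.mem_pyRange_one] at hi
      rw [PySem.List.slice_from pl hi.1]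
    rw [hBprods, pvSortInt_eq]
    -- facts about pl
    have hpl_pair : pl.Pairwise (·<·) :=
      (PySem.List.pairwise_lt_pyRange_one base (base*10)).filter _
    have hpl_mem : ∀ x ∈ pl, base ≤ x ∧ x < base*10 ∧ Nat.Prime x.toNat := by
      intro x hx
      rw [hpl, List.mem_filter, PySem.List.mem_pyRange_one] at hx
      exact ⟨hx.1.1, hx.1.2, (pvIsprimeB_iff x).mp hx.2⟩
    have hP_nd : (pvProds pl).Nodup :=
      pvProds_nodup hpl_pair (fun x hx => (hpl_mem x hx).2.2)
    have hP_bounds : ∀ z ∈ pvProds pl, base*base ≤ z ∧ z < (base*10)*(base*10) :=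
      pvProds_bounds hb1 (fun x hx => ⟨(hpl_mem x hx).1, (hpl_mem x hx).2.1⟩)
    have hdisj : ∀ z ∈ pvProds pl, z ∉ out := by
      intro z hz hmem
      have h1 := (hP_bounds z hz).1
      have h2 := hbound z hmem
      omega
    have hupd : PySem.Set.update out (pvProds pl) = out ++ pvProds pl :=
      PySem.Set.update_eq_append_of_disjoint out (pvProds pl) hP_nd hdisj
    have hcross : ∀ x ∈ out, ∀ y ∈ pvProds pl, x < y := by
      intro x hx y hy
      have h1 := hbound x hx
      have h2 := (hP_bounds y hy).1
      omega
    have happ : PySem.List.sorted (out ++ pvProds pl) (fun x => x) =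
        PySem.List.sorted out (fun x => x) ++ PySem.List.sorted (pvProds pl) (fun x => x) :=
      pvSorted_append out (pvProds pl) hnd hP_nd hcross
    rw [hupd]
    by_cases hstop : ct ≤ (((out ++ pvProds pl).length : Nat) : Int)
    · rw [if_pos hstop, ← happ]
      apply pvBandB_noop
      rw [PySem.List.length_sorted]
      omega
    · rw [if_neg hstop, ← happ]
      apply ih (base*10) (out ++ pvProds pl)
      · obtain ⟨k, rfl⟩ := hk
        exact ⟨k+1, by ring⟩
      · apply hnd.append hP_nd
        rw [List.disjoint_left]
        intro a ha hb
        exact hdisj a hb ha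
      · intro x hx
        rcases List.mem_append.mp hx with h | h
        · have := hbound x h; nlinarith
        · have := (hP_bounds x h).2; nlinarith
      · rw [List.length_append] at hstop ⊢
        omega

-- ---- top-level assembly ----

theorem pvBrilliant_pos (ct : Int) (hct : 1 ≤ ct) : brilliant ct = brilliant_alt ct := by
  unfold brilliant brilliant_alt
  rw [PySem.List.slice_zero_start, pvSortInt_eq]
  have h := pvBand_eq ct (ct.toNat + 1) 1 PySem.Set.empty ⟨0, by norm_num⟩
      List.nodup_nil (by intro x hx; cases hx) (by simpa using hct)
  rw [show PySem.List.sorted (PySem.Set.empty : PySem.Set Int) (fun x => x) = ([] : List Int)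
      from rfl] at h
  rw [← h]

def pvC : PySem.Set Int := [4, 6, 10, 14, 9, 15, 21, 25, 35, 49]
def pvL : List Int := [4, 6, 9, 10, 14, 15, 21, 25, 35, 49]

theorem pvBandA_base (ct : Int) (hct : ct ≤ 10) : bandA ct 1 1 PySem.Set.empty = pvC := by
  simp only [bandA]
  have h10 : genprimesA (1*10) = [2,3,5,7] := by
    rw [show (1:Int)*10 = 10 by norm_num, pvGenprimes_eq 10 (by norm_num)]
    decide
  rw [show (genprimesA (1*10)).filter (fun x => decide ((1:Int) ≤ x)) = [2,3,5,7] by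
    rw [h10]; decide]
  rw [show (PySem.List.pyRange 0 ((([2,3,5,7] : List Int).length : Nat) : Int) 1).foldl
      (fun o ai => (PySem.List.pyRange ai ((([2,3,5,7] : List Int).length : Nat) : Int) 1).foldl
        (fun o bi => PySem.Set.add o (PySem.List.pyGetD ([2,3,5,7] : List Int) ai 0 *
          PySem.List.pyGetD ([2,3,5,7] : List Int) bi 0)) o)
      PySem.Set.empty = pvC by decide]
  rw [if_pos (by rw [show ((pvC.length : Nat) : Int) = 10 by decide]; exact hct)]

theorem pvBrilliant_nonpos (ct : Int) (hct : ct ≤ 0) :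
    brilliant ct = PySem.List.slice pvL (some 0) (some ct) := by
  unfold brilliant
  rw [show ct.toNat + 1 = 1 by omega]
  rw [pvBandA_base ct (by omega)]
  rw [show pvSortInt pvC = pvL by rw [pvSortInt_eq]; decide]

theorem pvAlt_nonpos (ct : Int) (hct : ct ≤ 0) : brilliant_alt ct = [] := by
  unfold brilliant_alt
  rw [show ct.toNat + 1 = 1 by omega]
  simp only [bandB]
  rw [if_neg (by simp; omega)]
  simp [PySem.List.slice]

theorem pvSlice_L_neg (ct : Int) (h : ct ≤ -10) :
    PySem.List.slice pvL (some 0) (some ct) = [] := by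
  obtain ⟨k, hk, rfl⟩ : ∃ k : ℕ, 10 ≤ k ∧ ct = -(k:Int) := ⟨(-ct).toNat, by omega, by omega⟩
  apply List.eq_nil_of_length_eq_zero
  rw [PySem.List.length_slice]
  rw [PySem.List.clampIdx_neg_natCast _ _ (by omega)]
  rw [show ((0:Int)) = ((0:ℕ):Int) from rfl, PySem.List.clampIdx_natCast]
  rw [show pvL.length = 10 by decide]
  omega

theorem pvSlice_L_ne (ct : Int) (h1 : -10 < ct) (h2 : ct < 0) :
    PySem.List.slice pvL (some 0) (some ct) ≠ [] := by
  obtain ⟨k, hk1, hk9, rfl⟩ : ∃ k : ℕ, 1 ≤ k ∧ k ≤ 9 ∧ ct = -(k:Int) :=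
    ⟨(-ct).toNat, by omega, by omega, by omega⟩
  intro hcon
  have hlen := congrArg List.length hcon
  rw [PySem.List.length_slice] at hlen
  rw [PySem.List.clampIdx_neg_natCast _ _ (by omega)] at hlen
  rw [show ((0:Int)) = ((0:ℕ):Int) from rfl, PySem.List.clampIdx_natCast] at hlen
  rw [show pvL.length = 10 by decide] at hlen
  simp at hlen
  omega

-- ===== VERDICT (by name: the statement is the Claim_ definition above) =====
theorem brilliant_spec : Claim_unchanged_brilliant := by
  intro ct _dom
  unfold Spec_brilliant
  intro hnD
  unfold D_brilliant at hnD
  push_neg at hnD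
  by_cases hle : ct ≤ 0
  · rw [pvBrilliant_nonpos ct hle, pvAlt_nonpos ct hle]
    rcases eq_or_lt_of_le hle with rfl | hlt
    · decide
    · exact pvSlice_L_neg ct (by omega)
  · exact pvBrilliant_pos ct (by omega)
theorem brilliant_changed : Claim_changed_brilliant := by
  unfold Claim_changed_brilliant
  refine ⟨by decide, by decide, ?_, ?_, by decide⟩
  · rw [show pvDiffWitness_brilliant = (-3 : Int) from rfl,
        pvBrilliant_nonpos (-3) (by norm_num)]
    decide
  · rw [show pvDiffWitness_brilliant = (-3 : Int) from rfl,
        pvAlt_nonpos (-3) (by norm_num)]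
    rfl
theorem brilliant_tight : Claim_exact_brilliant := by
  intro ct _dom hD
  unfold D_brilliant at hD
  rw [pvBrilliant_nonpos ct (by omega), pvAlt_nonpos ct (by omega)]
  exact pvSlice_L_ne ct hD.1 hD.2
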